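-- pv_equiv track=rewrite | github.com/couchbaselabs/mobile-testkit | venv_bkup/lib/python2.7/site-packages/ansible/modules/core/network/sros/sros_rollback.py | sanitize_config
-- ===== SOURCE A (Python) =====
-- def sanitize_config(lines):
--     commands = list()
--     for line in lines:
--         for index, entry in enumerate(commands):
--             if line.startswith(entry):
--                 del commands[index]
--                 break
--         commands.append(line)
--     return commands
-- ===== SOURCE B (Python) =====
-- def sanitize_config(lines):
--     # Hash-indexed re-implementation: instead of rescanning the whole surviving-commands
--     # list for every line, keep a map from command text to its pending append-times and
--     # probe only the line's own prefixes; survivors are kept keyed by append time.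
--     times = {}   # command string -> increasing list of append times still alive
--     alive = {}   # append time -> command, in time (= insertion) order
--     for t, line in enumerate(lines):
--         best = None   # (append time, prefix) of the earliest surviving prefix command
--         for k in range(len(line) + 1):
--             lst = times.get(line[:k])
--             if lst and (best is None or lst[0] < best[0]):
--                 best = (lst[0], line[:k])
--         if best is not None:
--             times[best[1]].pop(0)
--             del alive[best[0]]
--         times.setdefault(line, []).append(t)
--         alive[t] = line
--     return list(alive.values())
-- ===== Notes on version B (the rewrite author's own statement) =====
-- stated objective: faster
-- what changed: Replaces A's inner scan of the whole surviving-commands list per line by a hash map from command text to its pending append-times: each line probes only its own len(line)+1 prefixes and deletes the earliest-time match, survivors being kept in a dict keyed by append time.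
import Mathlib
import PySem

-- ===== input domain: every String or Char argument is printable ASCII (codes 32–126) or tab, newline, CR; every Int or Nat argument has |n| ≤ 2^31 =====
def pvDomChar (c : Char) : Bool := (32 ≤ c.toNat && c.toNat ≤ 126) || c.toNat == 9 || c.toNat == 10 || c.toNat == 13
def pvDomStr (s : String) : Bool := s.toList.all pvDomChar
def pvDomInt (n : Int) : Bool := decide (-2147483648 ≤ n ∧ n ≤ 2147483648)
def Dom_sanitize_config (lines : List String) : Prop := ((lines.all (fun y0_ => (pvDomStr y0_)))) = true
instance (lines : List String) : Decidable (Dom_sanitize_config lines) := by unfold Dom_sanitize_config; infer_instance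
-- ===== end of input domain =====

-- B replaces A's per-line scan of the surviving-commands list by a hash map from command
-- text to pending append-times, probing only the line's own prefixes (objective: faster).

-- ===== PORT A =====
-- the inner 'for index, entry in enumerate(commands): if line.startswith(entry): del commands[index]; break'
def sanStep (line : String) : List String → List String
  | [] => []
  | e :: rest => if PySem.Str.startswith line e then rest else e :: sanStep line rest

def sanitize_config (lines : List String) : List String :=
  lines.foldl (fun commands line => sanStep line commands ++ [line]) []

-- ===== PORT B =====
-- the inner 'for k in range(len(line) + 1): …' scan for the earliest-time prefix command
def bestPrefix (times : PySem.Dict String (List Int)) (line : String) : Option (Int × String) :=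
  (PySem.List.pyRange 0 (PySem.Str.len line + 1) 1).foldl
    (fun best k =>
      match PySem.Dict.getD times (PySem.Str.slice line none (some k)) [], best with
      | [], _ => best
      | t0 :: _, none => some (t0, PySem.Str.slice line none (some k))
      | t0 :: _, some b =>
          if t0 < b.1 then some (t0, PySem.Str.slice line none (some k)) else best)
    none

-- one iteration of B's main loop (state: the 'times' and 'alive' dicts)
def sanStepB (st : PySem.Dict String (List Int) × PySem.Dict Int String)
    (tl : Int × String) : PySem.Dict String (List Int) × PySem.Dict Int String :=
  let st1 := match bestPrefix st.1 tl.2 with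
    | none => st
    | some b => (PySem.Dict.modify st.1 b.2 [] List.tail, PySem.Dict.erase st.2 b.1)
  (PySem.Dict.modify st1.1 tl.2 [] (· ++ [tl.1]), PySem.Dict.insert st1.2 tl.1 tl.2)

def sanitize_config_alt (lines : List String) : List String :=
  (((PySem.List.enumerate lines).foldl sanStepB (PySem.Dict.empty, PySem.Dict.empty)).2).values

-- ===== PRECONDITION & SPEC =====
def Spec_sanitize_config (lines : List String) (out : List String) : Prop := out = sanitize_config_alt lines
instance (lines : List String) (out : List String) : Decidable (Spec_sanitize_config lines out) := by unfold Spec_sanitize_config; infer_instance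

-- ===== CLAIM (what is proved, stated in full; the proofs are below) =====
def Claim_equal_sanitize_config : Prop := ∀ (lines : List String), Dom_sanitize_config lines → Spec_sanitize_config lines (sanitize_config lines)

-- ===== LEMMAS AND PROOFS =====

-- a line "matches" a surviving entry when it starts with the entry's command text
def isM (line : String) (e : Int × String) : Bool := PySem.Str.startswith line e.2

-- the loop invariant tying B's two dicts to the reference list of (time, command) pairs
def InvB (times : PySem.Dict String (List Int)) (alive : PySem.Dict Int String) (t : Int) : Prop :=
  (∀ s, PySem.Dict.getD times s [] = ((alive.items.filter (fun e => e.2 == s)).map (·.1))) ∧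
  alive.items.Pairwise (fun a b => a.1 < b.1) ∧
  (∀ e ∈ alive.items, e.1 < t)

theorem sanStep_eq_eraseP (line : String) (cmds : List String) :
    sanStep line cmds = cmds.eraseP (fun e => PySem.Str.startswith line e) := by
  induction cmds with
  | nil => rfl
  | cons e rest ih => simp [sanStep, List.eraseP_cons, ih]

-- head of a <-sorted list is ≤ every member
theorem head_le_of_pairwise {a : Int × String} {l : List (Int × String)}
    (h : (a :: l).Pairwise (fun x y => x.1 < y.1)) {b : Int × String} (hb : b ∈ a :: l) :
    a.1 ≤ b.1 := by
  rcases List.mem_cons.mp hb with rfl | hb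
  · exact le_refl _
  · exact le_of_lt (List.rel_of_pairwise_cons h hb)

-- in a fst-strictly-increasing list, fst determines the entry
theorem fst_inj_of_pairwise {l : List (Int × String)}
    (h : l.Pairwise (fun x y => x.1 < y.1)) :
    ∀ {x y : Int × String}, x ∈ l → y ∈ l → x.1 = y.1 → x = y := by
  induction l with
  | nil => intro x y hx; simp at hx
  | cons a l ih =>
    intro x y hx hy hxy
    cases List.mem_cons.mp hx with
    | inl h1 =>
      cases List.mem_cons.mp hy with
      | inl h2 => rw [h1, h2]
      | inr h2 =>
        exact absurd hxy (by have := List.rel_of_pairwise_cons h h2; rw [h1]; omega)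
    | inr h1 =>
      cases List.mem_cons.mp hy with
      | inl h2 =>
        exact absurd hxy (by have := List.rel_of_pairwise_cons h h1; rw [h2]; omega)
      | inr h2 => exact ih h.of_cons h1 h2 hxy

-- the shared 'append the new line' tail of B's loop body preserves the invariant
theorem append_step (times : PySem.Dict String (List Int)) (alive : PySem.Dict Int String)
    (t : Int) (line : String) (h : InvB times alive t) :
    InvB (PySem.Dict.modify times line [] (· ++ [t])) (PySem.Dict.insert alive t line) (t + 1) ∧
    (PySem.Dict.insert alive t line).items = alive.items ++ [(t, line)] := by
  obtain ⟨hfil, hpw, hbd⟩ := h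
  have hct : alive.contains t = false := by
    rw [PySem.Dict.contains_eq_decide_mem_keys]
    simp only [decide_eq_false_iff_not, PySem.Dict.keys, List.mem_map]
    rintro ⟨e, he, rfl⟩
    exact absurd (hbd e he) (lt_irrefl _)
  have hitems := PySem.Dict.items_insert_of_not_contains alive line hct
  refine ⟨⟨?_, ?_, ?_⟩, hitems⟩
  · intro s
    rw [PySem.Dict.getD_modify, hitems, List.filter_append, List.map_append, hfil]
    by_cases hs : s = line
    · subst hs; simp
    · have hls : (line == s) = false := beq_eq_false_iff_ne.mpr (Ne.symm hs)
      simp [hs, hls, hfil]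
  · rw [hitems]
    refine List.pairwise_append.mpr ⟨hpw, List.pairwise_singleton _ _, ?_⟩
    intro a ha b hb
    simp only [List.mem_singleton] at hb
    subst hb
    exact hbd a ha
  · rw [hitems]
    intro e he
    rcases List.mem_append.mp he with he | he
    · exact lt_trans (hbd e he) (by omega)
    · simp only [List.mem_singleton] at he; subst he; omega

-- the k-th candidate of B's inner loop: the earliest pending time of the prefix line[:k]
def prf (line : String) (k : Nat) : String := String.ofList (line.toList.take k)

def cnd (times : PySem.Dict String (List Int)) (line : String) (k : Nat) :
    Option (Int × String) :=
  match PySem.Dict.getD times (prf line k) [] with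
  | [] => none
  | t0 :: _ => some (t0, prf line k)

-- one iteration of B's inner min-scan, abstracted over the candidate function
def bstep (c : Nat → Option (Int × String)) (best : Option (Int × String)) (k : Nat) :
    Option (Int × String) :=
  match c k, best with
  | none, _ => best
  | some x, none => some x
  | some x, some b => if x.1 < b.1 then some x else best

theorem bstep_none {c : Nat → Option (Int × String)} {acc : Option (Int × String)} {k0 : Nat}
    (h : bstep c acc k0 = none) : acc = none ∧ c k0 = none := by
  rcases hck : c k0 with _ | x <;> rcases hacc : acc with _ | b <;>
    simp [bstep, hck, hacc] at h ⊢
  split at h <;> simp_all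

theorem bstep_isSome {c : Nat → Option (Int × String)} {acc : Option (Int × String)} {k0 : Nat}
    {b : Int × String} (h : acc = some b) : ∃ b', bstep c acc k0 = some b' := by
  subst h
  rcases hck : c k0 with _ | x
  · exact ⟨b, by simp [bstep, hck]⟩
  · by_cases hlt : x.1 < b.1
    · exact ⟨x, by simp [bstep, hck, hlt]⟩
    · exact ⟨b, by simp [bstep, hck, hlt]⟩

theorem bstep_some {c : Nat → Option (Int × String)} {acc : Option (Int × String)} {k0 : Nat}
    {x : Int × String} (h : bstep c acc k0 = some x) :
    (acc = some x ∨ c k0 = some x) ∧ (∀ b, acc = some b → x.1 ≤ b.1) ∧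
    (∀ y, c k0 = some y → x.1 ≤ y.1) := by
  rcases acc with _ | b
  · rcases hck : c k0 with _ | z <;> simp only [bstep, hck] at h
    · exact absurd h (by simp)
    · injection h with h
      subst h
      refine ⟨Or.inr rfl, fun b hb => ?_, fun y hy => ?_⟩
      · cases hb
      · injection hy with hy
        rw [hy]
  · rcases hck : c k0 with _ | z <;> simp only [bstep, hck] at h
    · injection h with h
      subst h
      refine ⟨Or.inl rfl, fun b' hb => ?_, fun y hy => ?_⟩
      · injection hb with hb
        rw [hb]
      · cases hy
    · by_cases hlt : z.1 < b.1
      · rw [if_pos hlt] at h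
        injection h with h
        subst h
        refine ⟨Or.inr rfl, fun b' hb => ?_, fun y hy => ?_⟩
        · injection hb with hb
          subst hb
          omega
        · injection hy with hy
          rw [hy]
      · rw [if_neg hlt] at h
        injection h with h
        subst h
        refine ⟨Or.inl rfl, fun b' hb => ?_, fun y hy => ?_⟩
        · injection hb with hb
          rw [hb]
        · injection hy with hy
          subst hy
          omega

theorem fold_none (c : Nat → Option (Int × String)) :
    ∀ (ks : List Nat), (∀ k ∈ ks, c k = none) → ks.foldl (bstep c) none = none := by
  intro ks
  induction ks with
  | nil => intro _; rfl
  | cons k0 ks ih =>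
    intro h
    have h0 : bstep c none k0 = none := by simp [bstep, h k0 (by simp)]
    simpa [h0] using ih (fun k hk => h k (by simp [hk]))

theorem fold_min (c : Nat → Option (Int × String)) :
    ∀ (ks : List Nat) (acc : Option (Int × String)),
      (ks.foldl (bstep c) acc = none → acc = none ∧ ∀ k ∈ ks, c k = none) ∧
      (∀ x, ks.foldl (bstep c) acc = some x →
        (acc = some x ∨ ∃ k ∈ ks, c k = some x) ∧
        (∀ b, acc = some b → x.1 ≤ b.1) ∧
        (∀ k ∈ ks, ∀ y, c k = some y → x.1 ≤ y.1)) := by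
  intro ks
  induction ks with
  | nil =>
    intro acc
    constructor
    · intro hr
      exact ⟨hr, by simp⟩
    · intro x hr
      have hr' : acc = some x := hr
      refine ⟨Or.inl hr', ?_, by simp⟩
      intro b hb
      rw [hr'] at hb
      injection hb with hb
      rw [hb]
  | cons k0 ks ih =>
    intro acc
    constructor
    · intro hr
      obtain ⟨h1, h2⟩ := (ih (bstep c acc k0)).1 (by simpa using hr)
      obtain ⟨h3, h4⟩ := bstep_none h1
      exact ⟨h3, by intro k hk; rcases List.mem_cons.mp hk with rfl | hk
                    exacts [h4, h2 k hk]⟩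
    · intro x hr
      obtain ⟨h1, h2, h3⟩ := (ih (bstep c acc k0)).2 x (by simpa using hr)
      refine ⟨?_, ?_, ?_⟩
      · rcases h1 with h1 | ⟨k, hk, hck⟩
        · rcases bstep_some h1 with ⟨h4, _, _⟩
          rcases h4 with h4 | h4
          · exact Or.inl h4
          · exact Or.inr ⟨k0, by simp, h4⟩
        · exact Or.inr ⟨k, by simp [hk], hck⟩
      · intro b hb
        obtain ⟨b', hb'⟩ := bstep_isSome (c := c) (k0 := k0) hb
        have := (bstep_some hb').2.1 b hb
        have := h2 b' hb'
        omega
      · intro k hk y hy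
        rcases List.mem_cons.mp hk with rfl | hk
        · rcases hbs : bstep c acc k with _ | b'
          · rw [(bstep_none hbs).2] at hy; cases hy
          · have := (bstep_some hbs).2.2 y hy
            have := h2 b' hbs
            omega
        · exact h3 k hk y hy

theorem pv_foldl_ext {α β : Type} (f g : α → β → α) (l : List β)
    (h : ∀ a b, b ∈ l → f a b = g a b) : ∀ a, l.foldl f a = l.foldl g a := by
  induction l with
  | nil => intro a; rfl
  | cons x xs ih =>
    intro a
    rw [List.foldl_cons, List.foldl_cons, h a x (by simp)]
    exact ih (fun a b hb => h a b (by simp [hb])) (g a x)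

-- B's inner loop, rewritten over Nat indices and the candidate function
theorem bp_eq (times : PySem.Dict String (List Int)) (line : String) :
    bestPrefix times line
      = (List.range (line.toList.length + 1)).foldl (bstep (cnd times line)) none := by
  unfold bestPrefix
  have hn : PySem.Str.len line + 1 = ((line.toList.length + 1 : Nat) : Int) := by
    simp [PySem.Str.len]
  rw [hn, PySem.List.pyRange_zero_natCast, List.foldl_map]
  have hsl : ∀ k : Nat, PySem.Str.slice line none (some (k : Int)) = prf line k := by
    intro k
    simp [PySem.Str.slice, prf, PySem.List.slice_to_natCast, String.ofList]
  refine pv_foldl_ext _ _ _ ?_ none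
  intro acc k _
  rw [hsl]
  rcases hg : PySem.Dict.getD times (prf line k) [] with _ | ⟨t0, rest⟩ <;>
    rcases acc with _ | b <;> simp [bstep, cnd, hg]

theorem best_spec (times : PySem.Dict String (List Int)) (alive : PySem.Dict Int String)
    (t : Int) (line : String) (h : InvB times alive t) :
    bestPrefix times line = alive.items.find? (isM line) := by
  obtain ⟨hfil, hpw, hbd⟩ := h
  rw [bp_eq]
  -- every candidate names a surviving matching entry, minimal among its value's entries
  have G1 : ∀ k y, cnd times line k = some y →
      y ∈ alive.items ∧ isM line y = true ∧ ∀ e ∈ alive.items, e.2 = y.2 → y.1 ≤ e.1 := by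
    intro k y hy
    unfold cnd at hy
    rcases hg : PySem.Dict.getD times (prf line k) [] with _ | ⟨t0, rest⟩ <;> rw [hg] at hy
    · exact absurd hy (by simp)
    · injection hy with hy
      subst hy
      have hmap : (alive.items.filter (fun e => e.2 == prf line k)).map (·.1) = t0 :: rest := by
        rw [← hfil]; exact hg
      rcases hfl : alive.items.filter (fun e => e.2 == prf line k) with _ | ⟨f0, ftl⟩
      · rw [hfl] at hmap; exact absurd hmap (by simp)
      · rw [hfl] at hmap
        have hf01 : f0.1 = t0 := by injection hmap
        have hf0mem : f0 ∈ alive.items :=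
          List.mem_of_mem_filter (by rw [hfl]; exact List.mem_cons_self ..)
        have hf02 : f0.2 = prf line k := by
          have := List.of_mem_filter (p := fun e : Int × String => e.2 == prf line k)
            (by rw [hfl]; exact List.mem_cons_self ..)
          simpa using this
        have hy0 : (t0, prf line k) = f0 := by
          rw [← hf01, ← hf02]
        rw [hy0]
        refine ⟨hf0mem, ?_, ?_⟩
        · simp only [isM, PySem.Str.startswith, PySem.Chars.startswith_iff]
          rw [hf02]
          simp [prf, List.take_prefix]
        · intro e he hev
          have hemem : e ∈ alive.items.filter (fun e => e.2 == prf line k) := by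
            refine List.mem_filter.mpr ⟨he, ?_⟩
            rw [← hf02]; simp [hev]
          rw [hfl] at hemem
          exact head_le_of_pairwise
            (by rw [← hfl]; exact List.Pairwise.sublist List.filter_sublist hpw) hemem
  cases hfind : alive.items.find? (isM line) with
  | none =>
    refine fold_none _ _ ?_
    intro k _
    rcases hc : cnd times line k with _ | y
    · rfl
    · obtain ⟨hmem, hm, _⟩ := G1 k y hc
      exact absurd hm (by simpa using List.find?_eq_none.mp hfind y hmem)
  | some m =>
    have hmmem : m ∈ alive.items := List.mem_of_find?_eq_some hfind
    obtain ⟨hm, as, bs, hal, hno⟩ := List.find?_eq_some_iff_append.mp hfind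
    -- m is minimal among surviving matches
    have Mmin : ∀ y ∈ alive.items, isM line y = true → m.1 ≤ y.1 := by
      intro y hy hym
      rw [hal] at hy
      rcases List.mem_append.mp hy with hy | hy
      · exact absurd hym (by simpa using hno y hy)
      · rw [hal] at hpw
        exact head_le_of_pairwise (List.pairwise_append.mp hpw).2.1 hy
    -- the prefix of length |m.2| yields exactly m as a candidate
    have hpre : m.2.toList <+: line.toList := by
      have := hm
      simpa [isM, PySem.Str.startswith, PySem.Chars.startswith_iff] using this
    have hkle : m.2.toList.length ≤ line.toList.length := hpre.length_le
    have hprf : prf line m.2.toList.length = m.2 := by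
      unfold prf
      rw [← List.prefix_iff_eq_take.mp hpre, String.ofList_toList]
    have hckstar : cnd times line m.2.toList.length = some m := by
      unfold cnd
      rw [hprf, hfil]
      rcases hfl : alive.items.filter (fun e => e.2 == m.2) with _ | ⟨f0, ftl⟩
      · have : m ∈ alive.items.filter (fun e => e.2 == m.2) :=
          List.mem_filter.mpr ⟨hmmem, by simp⟩
        rw [hfl] at this
        exact absurd this (by simp)
      · have hf0mem : f0 ∈ alive.items :=
          List.mem_of_mem_filter (by rw [hfl]; exact List.mem_cons_self ..)
        have hf02 : f0.2 = m.2 := by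
          have := List.of_mem_filter (p := fun e : Int × String => e.2 == m.2)
            (by rw [hfl]; exact List.mem_cons_self ..)
          simpa using this
        have hf0m : isM line f0 = true := by
          simp only [isM, PySem.Str.startswith] at hm ⊢
          rw [hf02]; exact hm
        have h1 : m.1 ≤ f0.1 := Mmin f0 hf0mem hf0m
        have h2 : f0.1 ≤ m.1 := by
          have hmf : m ∈ alive.items.filter (fun e => e.2 == m.2) :=
            List.mem_filter.mpr ⟨hmmem, by simp⟩
          rw [hfl] at hmf
          exact head_le_of_pairwise
            (by rw [← hfl]; exact List.Pairwise.sublist List.filter_sublist hpw) hmf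
        have hf0 : f0 = m := Prod.ext (by omega) hf02
        rw [hfl, List.map_cons]
        simp [hf0]
    rcases hr : (List.range (line.toList.length + 1)).foldl (bstep (cnd times line)) none
      with _ | x
    · rw [((fold_min (cnd times line) _ none).1 hr).2
        m.2.toList.length (List.mem_range.mpr (by omega))] at hckstar
      cases hckstar
    · obtain ⟨h1, _, h3⟩ := (fold_min (cnd times line) _ none).2 x hr
      rcases h1 with h1 | ⟨k, _, hck⟩
      · exact absurd h1 (by simp)
      · obtain ⟨hxmem, hxm, _⟩ := G1 k x hck
        have hge : m.1 ≤ x.1 := Mmin x hxmem hxm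
        have hle : x.1 ≤ m.1 :=
          h3 m.2.toList.length (List.mem_range.mpr (by omega)) m hckstar
        exact congrArg some (fst_inj_of_pairwise hpw hxmem hmmem (by omega))

theorem step_inv (times : PySem.Dict String (List Int)) (alive : PySem.Dict Int String)
    (t : Int) (line : String) (h : InvB times alive t) :
    InvB (sanStepB (times, alive) (t, line)).1 (sanStepB (times, alive) (t, line)).2 (t + 1) ∧
    (sanStepB (times, alive) (t, line)).2.items = alive.items.eraseP (isM line) ++ [(t, line)] := by
  have hbs := best_spec times alive t line h
  obtain ⟨hfil, hpw, hbd⟩ := h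
  cases hfind : alive.items.find? (isM line) with
  | none =>
    have hno : ∀ e ∈ alive.items, ¬ isM line e := by
      intro e he
      simpa using List.find?_eq_none.mp hfind e he
    have hred : sanStepB (times, alive) (t, line)
        = (PySem.Dict.modify times line [] (· ++ [t]), PySem.Dict.insert alive t line) := by
      simp [sanStepB, hbs, hfind]
    rw [hred]
    obtain ⟨hi, hit⟩ := append_step times alive t line ⟨hfil, hpw, hbd⟩
    exact ⟨hi, by rw [hit, List.eraseP_of_forall_not hno]⟩
  | some m =>
    have hdec := List.find?_eq_some_iff_append.mp hfind
    obtain ⟨hm, as, bs, hal, hno⟩ := hdec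
    have hno' : ∀ a ∈ as, ¬ isM line a = true := by simpa using hno
    -- entries of as and bs have fst ≠ m.1
    have hpw' := hpw
    rw [hal] at hpw'
    obtain ⟨pwas, pwmbs, cross⟩ := List.pairwise_append.mp hpw'
    have hasne : ∀ a ∈ as, (!a.1 == m.1) = true := by
      intro a ha
      have h2 : a.1 ≠ m.1 := by have := cross a ha m (by simp); omega
      simpa using h2
    have hbsne : ∀ b ∈ bs, (!b.1 == m.1) = true := by
      intro b hb
      have h2 : b.1 ≠ m.1 := by have := List.rel_of_pairwise_cons pwmbs hb; omega
      simpa using h2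
    have herase : (PySem.Dict.erase alive m.1).items = as ++ bs := by
      show (alive.items.filter (fun p => !p.1 == m.1)) = as ++ bs
      rw [hal, List.filter_append, List.filter_cons]
      simp [List.filter_eq_self.mpr hasne, List.filter_eq_self.mpr hbsne]
    have heraseP : alive.items.eraseP (isM line) = as ++ bs := by
      rw [hal, List.eraseP_append_right _ hno', List.eraseP_cons_of_pos hm]
    -- no entry of as has value m.2 (it would be an earlier match)
    have hasv : ∀ a ∈ as, (a.2 == m.2) = false := by
      intro a ha
      by_contra hc
      have : a.2 = m.2 := by
        simpa using (Bool.not_eq_false _).mp hc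
      exact hno' a ha (by simpa [isM, this] using hm)
    have hfilm : alive.items.filter (fun e => e.2 == m.2) = m :: bs.filter (fun e => e.2 == m.2) := by
      have h0 : List.filter (fun e => e.2 == m.2) as = [] :=
        List.filter_eq_nil_iff.mpr (by simpa using hasv)
      rw [hal, List.filter_append, List.filter_cons, h0]
      simp
    have hinv1 : InvB (PySem.Dict.modify times m.2 [] List.tail) (PySem.Dict.erase alive m.1) t := by
      refine ⟨?_, ?_, ?_⟩
      · intro s
        rw [PySem.Dict.getD_modify, herase]
        by_cases hs : s = m.2
        · subst hs
          have h0 : List.filter (fun e => e.2 == m.2) as = [] :=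
            List.filter_eq_nil_iff.mpr (by simpa using hasv)
          rw [hfil, hfilm, List.filter_append, h0]
          simp
        · have hms : (m.2 == s) = false := beq_eq_false_iff_ne.mpr (Ne.symm hs)
          rw [if_neg hs, hfil, hal, List.filter_append, List.filter_cons]
          simp [hms]
      · rw [herase]
        refine List.pairwise_append.mpr ⟨pwas, pwmbs.of_cons, ?_⟩
        intro a ha b hb
        exact cross a ha b (List.mem_cons_of_mem _ hb)
      · rw [herase]
        intro e he
        refine hbd e ?_
        rw [hal]
        rcases List.mem_append.mp he with he | he
        · exact List.mem_append.mpr (Or.inl he)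
        · exact List.mem_append.mpr (Or.inr (List.mem_cons_of_mem _ he))
    have hred : sanStepB (times, alive) (t, line)
        = (PySem.Dict.modify (PySem.Dict.modify times m.2 [] List.tail) line [] (· ++ [t]),
           PySem.Dict.insert (PySem.Dict.erase alive m.1) t line) := by
      simp [sanStepB, hbs, hfind]
    rw [hred]
    obtain ⟨hi, hit⟩ := append_step _ _ t line hinv1
    exact ⟨hi, by rw [hit, herase, heraseP]⟩

theorem main_fold (lines : List String) :
    ∀ (t : Int) (times : PySem.Dict String (List Int)) (alive : PySem.Dict Int String),
      InvB times alive t →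
      ((PySem.List.enumerate lines t).foldl sanStepB (times, alive)).2.items.map (·.2)
        = lines.foldl (fun commands line => sanStep line commands ++ [line])
            (alive.items.map (·.2)) := by
  induction lines with
  | nil => intro t times alive _; simp [PySem.List.enumerate_nil]
  | cons line rest ih =>
    intro t times alive h
    rw [PySem.List.enumerate_cons]
    simp only [List.foldl_cons]
    obtain ⟨h1, h2⟩ := step_inv times alive t line h
    have := ih (t + 1) (sanStepB (times, alive) (t, line)).1 (sanStepB (times, alive) (t, line)).2
      (by simpa using h1)
    rw [show sanStepB (times, alive) (t, line) =
        ((sanStepB (times, alive) (t, line)).1, (sanStepB (times, alive) (t, line)).2) from rfl] at this ⊢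
    rw [this, h2]
    congr 1
    rw [sanStep_eq_eraseP, List.eraseP_map]
    simp only [List.map_append]
    rfl

-- ===== VERDICT (by name: the statement is the Claim_ definition above) =====
theorem sanitize_config_spec : Claim_equal_sanitize_config := by
  intro lines _
  unfold Spec_sanitize_config sanitize_config sanitize_config_alt
  have h := main_fold lines 0 PySem.Dict.empty PySem.Dict.empty
    (by refine ⟨fun s => rfl, ?_, ?_⟩ <;> simp [PySem.Dict.empty])
  simp only [PySem.Dict.empty, List.map_nil] at h
  simp only [PySem.Dict.values]
  exact h.symm
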